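-- pv_equiv track=rewrite | github.com/Deniskoltovich/BSUIR-stuff | 4-semester/AOIS_/lab3/lab_lib.py | find_removable_implicants_table_process
-- ===== SOURCE A (Python) =====
-- def find_removable_implicants_table_process(reduced_func_implicants, reverted_table, influent_impl):
--     removable_implicants = set()
--     for col in reverted_table:
--         cover_implicant = [reduced_func_implicants[j] for j in range(len(col)) if col[j] == 1]
--         if any(implicant in influent_impl for implicant in cover_implicant):
--             continue
--         cover_implicant.sort(key=len, reverse=True)
--         removable_implicants.add(cover_implicant.pop())
--     return removable_implicants
-- ===== SOURCE B (Python) =====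
-- def find_removable_implicants_table_process(reduced_func_implicants, reverted_table, influent_impl):
--     # One fused pass per column: no intermediate cover list, no sort; selects the
--     # last minimum-length covering implicant directly (the element A's sort+pop yields).
--     influent = set(influent_impl)
--     removable = set()
--     for col in reverted_table:
--         best = None
--         skip = False
--         for j, v in enumerate(col):
--             if v == 1:
--                 imp = reduced_func_implicants[j]
--                 if imp in influent:
--                     skip = True
--                     break
--                 if best is None or len(imp) <= len(best):
--                     best = imp
--         if not skip and best is not None:
--             removable.add(best)
--     return removable
-- ===== Notes on version B (the rewrite author's own statement) =====
-- stated objective: faster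
-- what changed: Replaces per-column list-comprehension + any() scan + sort(key=len, reverse=True) + pop() with a single fused pass over each column that simultaneously checks influent membership (via a prebuilt set) and keeps the last minimum-length covering implicant, so no cover list is built and no sort is performed.
import Mathlib
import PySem

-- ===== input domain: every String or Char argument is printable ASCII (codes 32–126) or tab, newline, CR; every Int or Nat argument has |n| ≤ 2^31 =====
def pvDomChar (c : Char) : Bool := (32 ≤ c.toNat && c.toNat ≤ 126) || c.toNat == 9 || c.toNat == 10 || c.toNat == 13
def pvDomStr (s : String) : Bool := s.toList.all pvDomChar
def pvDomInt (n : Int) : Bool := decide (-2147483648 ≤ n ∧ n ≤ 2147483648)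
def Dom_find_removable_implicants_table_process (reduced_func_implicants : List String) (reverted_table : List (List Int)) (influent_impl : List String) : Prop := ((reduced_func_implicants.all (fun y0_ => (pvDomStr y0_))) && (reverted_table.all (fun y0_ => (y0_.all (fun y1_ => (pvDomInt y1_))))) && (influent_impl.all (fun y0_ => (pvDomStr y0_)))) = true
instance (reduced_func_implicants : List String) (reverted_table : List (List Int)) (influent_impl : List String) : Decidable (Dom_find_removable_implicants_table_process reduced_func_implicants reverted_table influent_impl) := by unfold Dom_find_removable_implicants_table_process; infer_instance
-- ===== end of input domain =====

-- ===== PORT A =====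
-- B replaces A's per-column build/any/sort/pop with one fused min-scan pass (objective: faster, no sort).
def find_removable_implicants_table_process (reduced_func_implicants : List String) (reverted_table : List (List Int)) (influent_impl : List String) : List String :=
  reverted_table.foldl (fun (removable : PySem.Set String) col =>
    -- cover_implicant = [reduced_func_implicants[j] for j in range(len(col)) if col[j] == 1]
    -- reduced_func_implicants[j] ported as getD: exact since Pre_ puts every such j in range
    let cover : List String :=
      ((List.range col.length).filter (fun j => col.getD j 0 == 1)).map
        (fun j => reduced_func_implicants.getD j "")
    if cover.any (fun implicant => influent_impl.contains implicant) then removable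
    else
      -- cover.sort(key=len, reverse=True); removable.add(cover.pop())
      -- pop() ported as getLast?.getD "": exact since Pre_ makes cover nonempty here
      PySem.Set.add removable
        ((PySem.List.sorted cover (fun s => PySem.Str.len s) true).getLast?.getD ""))
    PySem.Set.empty

-- ===== PORT B =====
def find_removable_implicants_table_process_alt (reduced_func_implicants : List String) (reverted_table : List (List Int)) (influent_impl : List String) : List String :=
  let influent := PySem.Set.ofList influent_impl
  reverted_table.foldl (fun (removable : PySem.Set String) col =>
    -- for j, v in enumerate(col): fused scan; state = (skip, best); skip=true models 'break'
    let st := (PySem.List.enumerate col).foldl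
      (fun (st : Bool × Option String) (jv : Int × Int) =>
        if st.1 then st
        else if jv.2 == 1 then
          -- reduced_func_implicants[j] ported as getD: exact since Pre_ puts j in range
          let imp := reduced_func_implicants.getD jv.1.toNat ""
          if influent.contains imp then (true, st.2)
          else
            match st.2 with
            | none => (false, some imp)
            | some b =>
                if PySem.Str.len imp <= PySem.Str.len b then (false, some imp)
                else (false, some b)
        else st)
      (false, none)
    match st with
    | (false, some best) => PySem.Set.add removable best
    | _ => removable)
    PySem.Set.empty

-- ===== PRECONDITION & SPEC =====
-- Pre_ excludes exactly the inputs where Python A raises IndexError: a column marking an index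
-- outside reduced_func_implicants, or a column whose covering set is empty and not influent (pop from []).
def Pre_find_removable_implicants_table_process (reduced_func_implicants : List String) (reverted_table : List (List Int)) (influent_impl : List String) : Prop :=
  ∀ col ∈ reverted_table,
    (∀ j < col.length, col.getD j 0 = 1 → j < reduced_func_implicants.length) ∧
    ((∀ j < col.length, col.getD j 0 = 1 → reduced_func_implicants.getD j "" ∉ influent_impl) →
      ∃ j < col.length, col.getD j 0 = 1)
instance (reduced_func_implicants : List String) (reverted_table : List (List Int)) (influent_impl : List String) : Decidable (Pre_find_removable_implicants_table_process reduced_func_implicants reverted_table influent_impl) := by unfold Pre_find_removable_implicants_table_process; infer_instance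
def pvWitness_find_removable_implicants_table_process : List String × List (List Int) × List String :=
  (["a", "bb"], ([[1, 0], [0, 1]], []))

def Spec_find_removable_implicants_table_process (reduced_func_implicants : List String) (reverted_table : List (List Int)) (influent_impl : List String) (out : List String) : Prop := out = find_removable_implicants_table_process_alt reduced_func_implicants reverted_table influent_impl
instance (reduced_func_implicants : List String) (reverted_table : List (List Int)) (influent_impl : List String) (out : List String) : Decidable (Spec_find_removable_implicants_table_process reduced_func_implicants reverted_table influent_impl out) := by unfold Spec_find_removable_implicants_table_process; infer_instance

-- ===== CLAIM (what is proved, stated in full; the proofs are below) =====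
def Claim_equal_find_removable_implicants_table_process : Prop := ∀ (reduced_func_implicants : List String) (reverted_table : List (List Int)) (influent_impl : List String), Dom_find_removable_implicants_table_process reduced_func_implicants reverted_table influent_impl → Pre_find_removable_implicants_table_process reduced_func_implicants reverted_table influent_impl → Spec_find_removable_implicants_table_process reduced_func_implicants reverted_table influent_impl (find_removable_implicants_table_process reduced_func_implicants reverted_table influent_impl)

-- ===== LEMMAS AND PROOFS =====

-- proof-side vocabulary --------------------------------------------------
-- B's running minimum step (last minimum-length element wins on ties)
def pvPick (o : Option String) (x : String) : Option String :=
  match o with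
  | none => some x
  | some b => if PySem.Str.len x <= PySem.Str.len b then some x else some b

-- the covering-implicant list of a column, structurally (g = absolute-index lookup)
def pvCov : List Int -> (Nat -> String) -> List String
  | [], _ => []
  | v :: t, g => if v == 1 then g 0 :: pvCov t (fun k => g (k + 1)) else pvCov t (fun k => g (k + 1))

theorem pv_insertBy_ne_nil (bf : String -> String -> Bool) (x : String) (acc : List String) :
    PySem.List.insertBy bf x acc ≠ [] := by
  cases acc with
  | nil => simp [PySem.List.insertBy]
  | cons y ys =>
      simp only [PySem.List.insertBy]
      split <;> simp

theorem pv_insertBy_pairwise (x : String) (acc : List String)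
    (h : acc.Pairwise (fun a b => PySem.Str.len b ≤ PySem.Str.len a)) :
    (PySem.List.insertBy (fun a b => decide (PySem.Str.len b < PySem.Str.len a)) x acc).Pairwise
      (fun a b => PySem.Str.len b ≤ PySem.Str.len a) := by
  induction acc with
  | nil => simp [PySem.List.insertBy]
  | cons y ys ih =>
      simp only [PySem.List.insertBy]
      rcases List.pairwise_cons.mp h with ⟨hy, hys⟩
      split
      · rename_i hlt
        simp only [decide_eq_true_eq] at hlt
        refine List.pairwise_cons.mpr ⟨?_, h⟩
        intro z hz
        rcases List.mem_cons.mp hz with hz | hz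
        · subst hz; omega
        · have := hy z hz; omega
      · rename_i hlt
        simp only [decide_eq_true_eq] at hlt
        refine List.pairwise_cons.mpr ⟨?_, ih hys⟩
        intro z hz
        rcases (PySem.List.mem_insertBy _ _ _ _).mp hz with hz | hz
        · subst hz; omega
        · exact hy z hz

theorem pv_insertBy_getLast (x : String) (acc : List String)
    (h : acc.Pairwise (fun a b => PySem.Str.len b ≤ PySem.Str.len a)) :
    (PySem.List.insertBy (fun a b => decide (PySem.Str.len b < PySem.Str.len a)) x acc).getLast?
      = pvPick acc.getLast? x := by
  induction acc with
  | nil => simp [PySem.List.insertBy, pvPick]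
  | cons y ys ih =>
      rcases List.pairwise_cons.mp h with ⟨hy, hys⟩
      simp only [PySem.List.insertBy]
      split
      · rename_i hlt
        simp only [decide_eq_true_eq] at hlt
        -- last of x :: y :: ys is last of y :: ys, and x never wins (its len is bigger)
        rcases hl : (y :: ys).getLast? with _ | l
        · simp at hl
        · have hmem : l ∈ y :: ys := List.mem_of_getLast? hl
          have hle : PySem.Str.len l ≤ PySem.Str.len y := by
            rcases List.mem_cons.mp hmem with hm | hm
            · subst hm; omega
            · exact hy l hm
          rw [List.getLast?_cons_cons, hl]
          have hnot : ¬ PySem.Str.len x ≤ PySem.Str.len l := by omega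
          simp only [pvPick, if_neg hnot]
      · rename_i hlt
        simp only [decide_eq_true_eq] at hlt
        have hne := pv_insertBy_ne_nil (fun a b => decide (PySem.Str.len b < PySem.Str.len a)) x ys
        cases ys with
        | nil =>
            have hxy : PySem.Str.len x ≤ PySem.Str.len y := by omega
            simp only [PySem.List.insertBy, List.getLast?_cons_cons, List.getLast?_singleton,
              pvPick, if_pos hxy]
        | cons z zs =>
            have h1 : ((y :: PySem.List.insertBy (fun a b => decide (PySem.Str.len b < PySem.Str.len a)) x (z :: zs)).getLast?)
                = (PySem.List.insertBy (fun a b => decide (PySem.Str.len b < PySem.Str.len a)) x (z :: zs)).getLast? := by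
              rcases he : PySem.List.insertBy (fun a b => decide (PySem.Str.len b < PySem.Str.len a)) x (z :: zs) with _ | ⟨w, ws⟩
              · exact absurd he hne
              · simp [List.getLast?_cons_cons]
            rw [h1, ih hys, List.getLast?_cons_cons]

theorem pv_foldl_ins (cover : List String) (acc : List String)
    (h : acc.Pairwise (fun a b => PySem.Str.len b ≤ PySem.Str.len a)) :
    (cover.foldl (fun acc x => PySem.List.insertBy (fun a b => decide (PySem.Str.len b < PySem.Str.len a)) x acc) acc).Pairwise (fun a b => PySem.Str.len b ≤ PySem.Str.len a)
    ∧ (cover.foldl (fun acc x => PySem.List.insertBy (fun a b => decide (PySem.Str.len b < PySem.Str.len a)) x acc) acc).getLast?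
      = cover.foldl pvPick acc.getLast? := by
  induction cover generalizing acc with
  | nil => exact ⟨h, rfl⟩
  | cons x t ih =>
      have hp := pv_insertBy_pairwise x acc h
      have hg := pv_insertBy_getLast x acc h
      simp only [List.foldl_cons]
      rcases ih _ hp with ⟨h1, h2⟩
      exact ⟨h1, by rw [h2, hg]⟩

theorem pv_sorted_getLast (cover : List String) :
    (PySem.List.sorted cover (fun s => PySem.Str.len s) true).getLast? = cover.foldl pvPick none := by
  rw [PySem.List.sorted_rev_eq_foldl_insertBy]
  have := (pv_foldl_ins cover [] (by simp)).2
  simpa using this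

theorem pv_pick_isSome (cover : List String) (b : String) :
    (cover.foldl pvPick (some b)).isSome := by
  induction cover generalizing b with
  | nil => simp
  | cons x t ih =>
      simp only [List.foldl_cons, pvPick]
      split <;> exact ih _

theorem pv_coverA_eq (col : List Int) (g : Nat -> String) :
    ((List.range col.length).filter (fun j => col.getD j 0 == 1)).map g = pvCov col g := by
  induction col generalizing g with
  | nil => rfl
  | cons v t ih =>
      rw [show (v :: t).length = t.length + 1 from rfl, List.range_succ_eq_map]
      rw [List.filter_cons]
      have hcomp : ((fun j => (v :: t).getD j 0 == 1) ∘ Nat.succ) = (fun j => t.getD j 0 == 1) := by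
        funext j; simp
      rw [List.filter_map, hcomp]
      simp only [List.getD_cons_zero, pvCov]
      by_cases hv : (v == 1) = true
      · rw [if_pos hv, if_pos hv, List.map_cons, List.map_map,
          show (g ∘ Nat.succ) = (fun k => g (k + 1)) from rfl, ih]
      · rw [if_neg hv, if_neg hv, List.map_map,
          show (g ∘ Nat.succ) = (fun k => g (k + 1)) from rfl, ih]

theorem pv_cov_congr (col : List Int) (g1 g2 : Nat -> String) (h : ∀ k, g1 k = g2 k) :
    pvCov col g1 = pvCov col g2 := by
  induction col generalizing g1 g2 with
  | nil => rfl
  | cons v t ih =>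
      simp only [pvCov]
      rw [h 0, ih (fun k => g1 (k + 1)) (fun k => g2 (k + 1)) (fun k => h (k + 1))]

theorem pv_coverB_eq (col : List Int) (s : Int) (f : Int -> String) :
    (PySem.List.enumerate col s).filterMap (fun p => if p.2 == 1 then some (f p.1) else none)
      = pvCov col (fun k => f (s + k)) := by
  induction col generalizing s with
  | nil => simp [PySem.List.enumerate_nil, pvCov]
  | cons v t ih =>
      rw [PySem.List.enumerate_cons]
      have ht := ih (s + 1)
      have hco : pvCov t (fun k => f (s + 1 + (k : Int))) = pvCov t (fun k => f (s + ((k : Int) + 1))) := by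
        apply pv_cov_congr; intro k; congr 1; ring
      by_cases hv : (v == 1) = true
      · simp only [List.filterMap_cons, hv, if_true, pvCov]
        simp only [ht, hco]
        simp
      · simp only [List.filterMap_cons, hv, pvCov, Bool.false_eq_true, if_false]
        simp only [ht, hco]
        apply pv_cov_congr
        intro k
        congr 1

theorem pv_contains_ofList (l : List String) (x : String) :
    PySem.Set.contains (PySem.Set.ofList l) x = l.contains x := by
  simp [PySem.Set.contains, PySem.Set.mem_ofList]

theorem pv_bfold_stuck (red : List String) (influent : PySem.Set String)
    (ps : List (Int × Int)) (st : Bool × Option String) (h : st.1 = true) :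
    ps.foldl
      (fun (st : Bool × Option String) (jv : Int × Int) =>
        if st.1 then st
        else if jv.2 == 1 then
          let imp := red.getD jv.1.toNat ""
          if influent.contains imp then (true, st.2)
          else
            match st.2 with
            | none => (false, some imp)
            | some b =>
                if PySem.Str.len imp <= PySem.Str.len b then (false, some imp)
                else (false, some b)
        else st) st = st := by
  obtain ⟨a, b⟩ := st
  cases a with
  | false => simp at h
  | true =>
      induction ps with
      | nil => rfl
      | cons p ps ih => exact ih

theorem pv_bfold_clean (red : List String) (influent : PySem.Set String)
    (ps : List (Int × Int)) (o : Option String)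
    (h : ∀ y ∈ ps.filterMap (fun p => if p.2 == 1 then some (red.getD p.1.toNat "") else none),
          influent.contains y = false) :
    ps.foldl
      (fun (st : Bool × Option String) (jv : Int × Int) =>
        if st.1 then st
        else if jv.2 == 1 then
          let imp := red.getD jv.1.toNat ""
          if influent.contains imp then (true, st.2)
          else
            match st.2 with
            | none => (false, some imp)
            | some b =>
                if PySem.Str.len imp <= PySem.Str.len b then (false, some imp)
                else (false, some b)
        else st) (false, o)
      = (false, (ps.filterMap (fun p => if p.2 == 1 then some (red.getD p.1.toNat "") else none)).foldl pvPick o) := by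
  induction ps generalizing o with
  | nil => rfl
  | cons p ps ih =>
      by_cases hv : (p.2 == 1) = true
      · have hv' : p.2 = 1 := by simpa using hv
        have hc : influent.contains (red.getD p.1.toNat "") = false := by
          apply h
          simp [List.filterMap_cons, hv, hv']
        have hc2 : red[p.1.toNat]?.getD "" ∉ influent := by
          simpa [PySem.Set.contains, List.getD] using hc
        have hstep : ∀ (o : Option String),
            (if (false, o).1 then (false, o)
             else if p.2 == 1 then
               let imp := red.getD p.1.toNat ""
               if influent.contains imp then (true, (false, o).2)
               else
                 match (false, o).2 with
                 | none => (false, some imp)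
                 | some b =>
                     if PySem.Str.len imp <= PySem.Str.len b then (false, some imp)
                     else (false, some b)
             else (false, o) : Bool × Option String) = (false, pvPick o (red.getD p.1.toNat "")) := by
          intro o
          cases o <;> (simp [hv, hc2, pvPick]; try (split <;> rfl))
        simp only [List.foldl_cons, hstep]
        rw [ih (pvPick o (red.getD p.1.toNat "")) (by
          intro y hy
          apply h y
          simp only [List.filterMap_cons, hv', if_pos rfl, List.mem_cons]
          right
          exact hy)]
        simp [List.filterMap_cons, hv, hv']
      · have hstep :
            (if (false, o).1 then (false, o)
             else if p.2 == 1 then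
               let imp := red.getD p.1.toNat ""
               if influent.contains imp then (true, (false, o).2)
               else
                 match (false, o).2 with
                 | none => (false, some imp)
                 | some b =>
                     if PySem.Str.len imp <= PySem.Str.len b then (false, some imp)
                     else (false, some b)
             else (false, o) : Bool × Option String) = (false, o) := by
          simp [hv]
        simp only [List.foldl_cons, hstep]
        have hv' : ¬ p.2 = 1 := by simpa using hv
        rw [ih o (by intro y hy; exact h y (by simpa [List.filterMap_cons, hv, hv'] using hy))]
        simp [List.filterMap_cons, hv, hv']

theorem pv_bfold_dirty (red : List String) (influent : PySem.Set String)
    (ps : List (Int × Int)) (o : Option String)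
    (h : ∃ y ∈ ps.filterMap (fun p => if p.2 == 1 then some (red.getD p.1.toNat "") else none),
          influent.contains y = true) :
    (ps.foldl
      (fun (st : Bool × Option String) (jv : Int × Int) =>
        if st.1 then st
        else if jv.2 == 1 then
          let imp := red.getD jv.1.toNat ""
          if influent.contains imp then (true, st.2)
          else
            match st.2 with
            | none => (false, some imp)
            | some b =>
                if PySem.Str.len imp <= PySem.Str.len b then (false, some imp)
                else (false, some b)
        else st) (false, o)).1 = true := by
  induction ps generalizing o with
  | nil => simp at h
  | cons p ps ih =>
      by_cases hv : (p.2 == 1) = true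
      · by_cases hc : influent.contains (red.getD p.1.toNat "") = true
        · have hc2 : red[p.1.toNat]?.getD "" ∈ influent := by
            simpa [PySem.Set.contains, List.getD] using hc
          have hstep :
              (if (false, o).1 then (false, o)
               else if p.2 == 1 then
                 let imp := red.getD p.1.toNat ""
                 if influent.contains imp then (true, (false, o).2)
                 else
                   match (false, o).2 with
                   | none => (false, some imp)
                   | some b =>
                       if PySem.Str.len imp <= PySem.Str.len b then (false, some imp)
                       else (false, some b)
               else (false, o) : Bool × Option String) = (true, o) := by
            simp [hv, hc2]
          simp only [List.foldl_cons, hstep]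
          rw [pv_bfold_stuck red influent ps (true, o) rfl]
        · have hc' : red[p.1.toNat]?.getD "" ∉ influent := by
            simpa [PySem.Set.contains, List.getD] using hc
          have hstep :
              (if (false, o).1 then (false, o)
               else if p.2 == 1 then
                 let imp := red.getD p.1.toNat ""
                 if influent.contains imp then (true, (false, o).2)
                 else
                   match (false, o).2 with
                   | none => (false, some imp)
                   | some b =>
                       if PySem.Str.len imp <= PySem.Str.len b then (false, some imp)
                       else (false, some b)
               else (false, o) : Bool × Option String) = (false, pvPick o (red.getD p.1.toNat "")) := by
            cases o <;> (simp [hv, hc', pvPick]; try (split <;> rfl))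
          simp only [List.foldl_cons, hstep]
          apply ih
          rcases h with ⟨y, hy, hcy⟩
          simp only [List.filterMap_cons, hv, if_pos rfl] at hy
          rcases List.mem_cons.mp hy with rfl | hy
          · exact absurd hcy (by simp [PySem.Set.contains, hc'])
          · exact ⟨y, hy, hcy⟩
      · have hstep :
            (if (false, o).1 then (false, o)
             else if p.2 == 1 then
               let imp := red.getD p.1.toNat ""
               if influent.contains imp then (true, (false, o).2)
               else
                 match (false, o).2 with
                 | none => (false, some imp)
                 | some b =>
                     if PySem.Str.len imp <= PySem.Str.len b then (false, some imp)
                     else (false, some b)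
             else (false, o) : Bool × Option String) = (false, o) := by
          simp [hv]
        simp only [List.foldl_cons, hstep]
        apply ih
        rcases h with ⟨y, hy, hcy⟩
        simp only [List.filterMap_cons, hv] at hy
        exact ⟨y, by simpa [hv] using hy, hcy⟩

-- ===== VERDICT (by name: the statement is the Claim_ definition above) =====
-- per-column agreement of the two loop bodies, under the column's Pre_ facts
theorem pv_col_eq (red : List String) (infl : List String) (col : List Int)
    (hj : ∀ j < col.length, col.getD j 0 = 1 → j < red.length)
    (hne : (∀ j < col.length, col.getD j 0 = 1 → red.getD j "" ∉ infl) →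
      ∃ j < col.length, col.getD j 0 = 1)
    (acc : PySem.Set String) :
    (let cover : List String :=
        ((List.range col.length).filter (fun j => col.getD j 0 == 1)).map
          (fun j => red.getD j "")
     if cover.any (fun implicant => infl.contains implicant) then acc
     else
       PySem.Set.add acc
         ((PySem.List.sorted cover (fun s => PySem.Str.len s) true).getLast?.getD ""))
    = (let st := (PySem.List.enumerate col).foldl
        (fun (st : Bool × Option String) (jv : Int × Int) =>
          if st.1 then st
          else if jv.2 == 1 then
            let imp := red.getD jv.1.toNat ""
            if (PySem.Set.ofList infl).contains imp then (true, st.2)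
            else
              match st.2 with
              | none => (false, some imp)
              | some b =>
                  if PySem.Str.len imp <= PySem.Str.len b then (false, some imp)
                  else (false, some b)
          else st)
        (false, none)
       match st with
       | (false, some best) => PySem.Set.add acc best
       | _ => acc) := by
  have hA := pv_coverA_eq col (fun j => red.getD j "")
  have hB := pv_coverB_eq col 0 (fun j : Int => red.getD j.toNat "")
  have hgg : pvCov col (fun k => red.getD ((0 : Int) + (k : Int)).toNat "")
      = pvCov col (fun j => red.getD j "") := by
    apply pv_cov_congr
    intro k
    simp
  have hBC := hB.trans hgg
  by_cases hinf : ∃ y ∈ pvCov col (fun j => red.getD j ""), infl.contains y = true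
  · -- some covering implicant is influent: both sides keep acc
    have hanyA : (((List.range col.length).filter (fun j => col.getD j 0 == 1)).map
        (fun j => red.getD j "")).any (fun implicant => infl.contains implicant) = true := by
      rw [hA, List.any_eq_true]
      exact hinf
    have hdirty := pv_bfold_dirty red (PySem.Set.ofList infl) (PySem.List.enumerate col) none
      (by
        rw [hBC]
        rcases hinf with ⟨y, hy, hcy⟩
        exact ⟨y, hy, by rw [pv_contains_ofList]; exact hcy⟩)
    simp only [hanyA, if_true]
    rcases hst : (PySem.List.enumerate col).foldl _ (false, none) with ⟨a, b⟩
    rw [hst] at hdirty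
    simp only at hdirty
    subst hdirty
    rfl
  · -- no covering implicant is influent: both sides add the last minimum-length implicant
    have hall : ∀ y ∈ pvCov col (fun j => red.getD j ""), infl.contains y = false := by
      intro y hy
      by_contra hcy
      exact hinf ⟨y, hy, by simpa using hcy⟩
    have hanyA : (((List.range col.length).filter (fun j => col.getD j 0 == 1)).map
        (fun j => red.getD j "")).any (fun implicant => infl.contains implicant) = false := by
      rw [hA, List.any_eq_false]
      intro y hy
      simpa using hall y hy
    have hclean := pv_bfold_clean red (PySem.Set.ofList infl) (PySem.List.enumerate col) none
      (by
        rw [hBC]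
        intro y hy
        rw [pv_contains_ofList]
        exact hall y hy)
    rw [hBC] at hclean
    -- the cover is nonempty
    have hcne : pvCov col (fun j => red.getD j "") ≠ [] := by
      rcases hne (by
        intro j hjlen hj1
        have hmem : red.getD j "" ∈ pvCov col (fun j => red.getD j "") := by
          rw [← hA]
          exact List.mem_map_of_mem (List.mem_filter.mpr ⟨List.mem_range.mpr hjlen, beq_iff_eq.mpr hj1⟩)
        have := hall _ hmem
        simpa using this) with ⟨j, hjlen, hj1⟩
      have hmem : red.getD j "" ∈ pvCov col (fun j => red.getD j "") := by
        rw [← hA]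
        exact List.mem_map_of_mem (List.mem_filter.mpr ⟨List.mem_range.mpr hjlen, beq_iff_eq.mpr hj1⟩)
      exact List.ne_nil_of_mem hmem
    rcases hCov : pvCov col (fun j => red.getD j "") with _ | ⟨c, rest⟩
    · exact absurd hCov hcne
    · have hsome : ((c :: rest).foldl pvPick none).isSome := by
        simpa [pvPick] using pv_pick_isSome rest c
      rcases hbest : (c :: rest).foldl pvPick none with _ | best
      · rw [hbest] at hsome
        simp at hsome
      · simp only [hanyA]
        rw [hCov] at hclean
        rw [hclean, hbest]
        simp only [Bool.false_eq_true, if_false]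
        rw [pv_sorted_getLast, hA, hCov, hbest]
        rfl

theorem find_removable_implicants_table_process_spec : Claim_equal_find_removable_implicants_table_process := by
  intro red table infl _hDom hPre
  unfold Spec_find_removable_implicants_table_process
  unfold find_removable_implicants_table_process find_removable_implicants_table_process_alt
  apply PySem.List.foldl_congr_mem
  intro acc col hcol
  obtain ⟨hj, hne⟩ := hPre col hcol
  exact pv_col_eq red infl col hj hne acc
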